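-- pv_equiv track=rewrite | github.com/Jouramie/10000000-bot | src/domain/tile.py | _find_completing_indices_in_line
-- ===== SOURCE A (Python) =====
-- from typing import List, Set, Tuple, Sized, Iterable, FrozenSet
--
-- def _find_completing_indices_in_line(present_index_in_line: {Set[int]}) -> Set[int]:
--     if len(present_index_in_line) == 1:
--         return set()
--
--     min_present_tile = min(present_index_in_line)
--     max_present_tile = max(present_index_in_line)
--
--     if min_present_tile + 1 == max_present_tile:
--         return {min_present_tile - 1, max_present_tile + 1}
--
--     for i in range(min_present_tile, max_present_tile):
--         if i not in present_index_in_line: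
--             return {i}
-- ===== SOURCE B (Python) =====
-- def _find_completing_indices_in_line(present_index_in_line):
--     if len(present_index_in_line) == 1:
--         return set()
--
--     ordered = sorted(present_index_in_line)
--     lowest, highest = ordered[0], ordered[-1]
--
--     if lowest + 1 == highest:
--         return {lowest - 1, highest + 1}
--
--     for previous, following in zip(ordered, ordered[1:]):
--         if following - previous > 1:
--             return {previous + 1}
-- ===== Notes on version B (the rewrite author's own statement) =====
-- stated objective: alternative
-- what changed: Instead of scanning every integer from min to max and testing set membership for each, B sorts the present indices once and walks consecutive pairs of the sorted list, returning the first gap it meets; the cost depends on the number of tiles, not on the numeric span between min and max.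
-- outside the precondition, e.g. on _find_completing_indices_in_line(set()): A raises ValueError, B raises IndexError; on _find_completing_indices_in_line({1, 2, 3}): A returns None, B returns None
import Mathlib
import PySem

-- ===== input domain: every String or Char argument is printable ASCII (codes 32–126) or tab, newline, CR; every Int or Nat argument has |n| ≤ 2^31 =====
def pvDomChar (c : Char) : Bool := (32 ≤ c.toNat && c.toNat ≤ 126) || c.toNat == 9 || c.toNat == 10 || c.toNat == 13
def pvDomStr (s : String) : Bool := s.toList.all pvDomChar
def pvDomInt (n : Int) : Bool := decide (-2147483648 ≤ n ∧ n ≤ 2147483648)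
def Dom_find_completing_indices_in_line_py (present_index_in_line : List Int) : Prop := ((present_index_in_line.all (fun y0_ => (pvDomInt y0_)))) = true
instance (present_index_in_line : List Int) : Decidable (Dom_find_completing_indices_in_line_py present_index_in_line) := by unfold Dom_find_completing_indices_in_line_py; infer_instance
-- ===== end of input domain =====

-- B replaces A's scan over every integer between min and max (a membership test per integer) by a single
-- walk over consecutive pairs of the sorted present indices, returning at the first gap; an alternative
-- algorithm whose work depends on the number of tiles rather than on the numeric span.

-- ===== PORT A =====
-- the 'for i in range(min, max): if i not in s: return {i}' loop as a counting loop
-- (Python's range is lazy); fall-through (Python None) gives []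
-- the loop counter i starts at min; the fuel is the number of range elements, (mx - i).toNat
def pvScanA (xs : List Int) : Nat → Int → List Int
  | 0, _ => []
  | fuel + 1, i => if i ∉ xs then [i] else pvScanA xs fuel (i + 1)

def find_completing_indices_in_line_py (present_index_in_line : List Int) : List Int :=
  if present_index_in_line.length = 1 then []
  else
    -- min(s)/max(s) are the running extrema over the elements (PySem.List.min?_id_cons / max?_id_cons);
    -- on the empty set they raise ValueError — excluded by Pre_, [] here
    match present_index_in_line with
    | [] => []
    | h :: t =>
      let min_present_tile := t.foldl min h
      let max_present_tile := t.foldl max h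
      if min_present_tile + 1 = max_present_tile then
        [min_present_tile - 1, max_present_tile + 1]
      else
        pvScanA present_index_in_line
          (max_present_tile - min_present_tile).toNat min_present_tile

-- ===== PORT B =====
-- the 'for previous, following in zip(ordered, ordered[1:]): …' loop; fall-through gives []
def pvGapScan : List Int → List Int
  | previous :: following :: rest =>
      if following - previous > 1 then [previous + 1] else pvGapScan (following :: rest)
  | _ => []

def find_completing_indices_in_line_py_alt (present_index_in_line : List Int) : List Int :=
  if present_index_in_line.length = 1 then []
  else
    let ordered := PySem.List.sorted present_index_in_line (fun x => x) false
    match PySem.List.pyGet? ordered 0 with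
    | none => []  -- ordered[0] on the empty set raises IndexError; excluded by Pre_
    | some lowest =>
      match PySem.List.pyGet? ordered (-1) with
      | none => []
      | some highest =>
        if lowest + 1 = highest then [lowest - 1, highest + 1]
        else pvGapScan ordered

-- ===== PRECONDITION & SPEC =====
-- Pre_ excludes the empty set, on which A raises ValueError (min of an empty set), and the contiguous
-- sets of size ≥ 3 (no missing index strictly between min and max and min+1 ≠ max), on which A falls off
-- the loop and returns None instead of a set — Python B does exactly the same on both (IndexError / None).
def Pre_find_completing_indices_in_line_py : List Int → Prop
  | [] => False
  | [_] => True
  | h :: t =>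
      t.foldl min h + 1 = t.foldl max h ∨
      ((PySem.List.dedup (h :: t)).length : Int) < t.foldl max h - t.foldl min h + 1

instance (present_index_in_line : List Int) : Decidable (Pre_find_completing_indices_in_line_py present_index_in_line) := by
  unfold Pre_find_completing_indices_in_line_py
  rcases present_index_in_line with _ | ⟨h, _ | t⟩ <;> infer_instance

def pvWitness_find_completing_indices_in_line_py : List Int := [1, 4]

def Spec_find_completing_indices_in_line_py (present_index_in_line : List Int) (out : List Int) : Prop := out = find_completing_indices_in_line_py_alt present_index_in_line
instance (present_index_in_line : List Int) (out : List Int) : Decidable (Spec_find_completing_indices_in_line_py present_index_in_line out) := by unfold Spec_find_completing_indices_in_line_py; infer_instance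

-- ===== CLAIM (what is proved, stated in full; the proofs are below) =====
def Claim_equal_find_completing_indices_in_line_py : Prop := ∀ (present_index_in_line : List Int), Dom_find_completing_indices_in_line_py present_index_in_line → Pre_find_completing_indices_in_line_py present_index_in_line → Spec_find_completing_indices_in_line_py present_index_in_line (find_completing_indices_in_line_py present_index_in_line)

-- ===== LEMMAS AND PROOFS =====


-- the first element of the sorted list is the running minimum of the input
theorem pv_head_sorted (h : Int) (t : List Int) (lo : Int) (rest : List Int)
    (hs : PySem.List.sorted (h :: t) (fun x => x) false = lo :: rest) :
    lo = t.foldl min h := by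
  have hperm := PySem.List.sorted_perm (h :: t) (fun x => x) false
  have hpw := PySem.List.sorted_pairwise (h :: t) (fun x => x)
  rw [hs] at hperm hpw
  have hlo_le : ∀ z ∈ rest, lo ≤ z := (List.pairwise_cons.mp hpw).1
  have hmn_mem : t.foldl min h ∈ h :: t := by
    rcases PySem.List.foldl_min_mem t h with h' | h'
    · rw [h']; exact List.mem_cons_self
    · exact List.mem_cons_of_mem _ h'
  have hmn_in : t.foldl min h ∈ lo :: rest := hperm.mem_iff.mpr hmn_mem
  have hlo_in : lo ∈ h :: t := hperm.mem_iff.mp List.mem_cons_self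
  have h1 : t.foldl min h ≤ lo := by
    rcases List.mem_cons.mp hlo_in with h' | h'
    · exact h' ▸ (PySem.List.foldl_min_le t h).1
    · exact (PySem.List.foldl_min_le t h).2 lo h'
  have h2 : lo ≤ t.foldl min h := by
    rcases List.mem_cons.mp hmn_in with h' | h'
    · omega
    · exact hlo_le _ h'
  omega

-- in a ≤-sorted list every element is bounded by the last one
theorem pv_le_getLast : ∀ (l : List Int), l.Pairwise (· ≤ ·) →
    ∀ x, l.getLast? = some x → ∀ y ∈ l, y ≤ x := by
  intro l
  induction l with
  | nil => simp
  | cons a tl ih =>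
    intro hpw x hx y hy
    match tl, hpw, hx, hy, ih with
    | [], _, hx, hy, _ =>
      simp at hx hy
      omega
    | b :: tl, hpw, hx, hy, ih =>
      rw [List.getLast?_cons_cons] at hx
      have hx_mem : x ∈ b :: tl := List.mem_of_getLast? hx
      rcases List.mem_cons.mp hy with h' | h'
      · exact h' ▸ (List.pairwise_cons.mp hpw).1 x hx_mem
      · exact ih (List.pairwise_cons.mp hpw).2 x hx y h'

-- the last element of the sorted list is the running maximum of the input
theorem pv_last_sorted (h : Int) (t : List Int) (x : Int)
    (hx : (PySem.List.sorted (h :: t) (fun x => x) false).getLast? = some x) :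
    x = t.foldl max h := by
  have hperm := PySem.List.sorted_perm (h :: t) (fun x => x) false
  have hpw := PySem.List.sorted_pairwise (h :: t) (fun x => x)
  have hx_mem : x ∈ PySem.List.sorted (h :: t) (fun x => x) false := List.mem_of_getLast? hx
  have hmx_mem : t.foldl max h ∈ h :: t := by
    rcases PySem.List.foldl_max_mem t h with h' | h'
    · rw [h']; exact List.mem_cons_self
    · exact List.mem_cons_of_mem _ h'
  have h1 : t.foldl max h ≤ x :=
    pv_le_getLast _ hpw x hx _ ((hperm.mem_iff).mpr hmx_mem)
  have h2 : x ≤ t.foldl max h := by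
    rcases List.mem_cons.mp ((hperm.mem_iff).mp hx_mem) with h' | h'
    · exact h' ▸ (PySem.List.le_foldl_max t h).1
    · exact (PySem.List.le_foldl_max t h).2 x h'
  omega

-- below any missing element there is a LEAST missing element
theorem pv_exists_least (xs : List Int) (mn : Int) :
    ∀ (n : Nat) (i : Int), (i - mn).toNat = n → mn ≤ i → i ∉ xs →
      ∃ m, mn ≤ m ∧ m ≤ i ∧ m ∉ xs ∧ ∀ j, mn ≤ j → j < m → j ∈ xs := by
  intro n
  induction n using Nat.strong_induction_on with
  | _ n ih =>
    intro i h0 hmn hi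
    by_cases hc : ∀ j, mn ≤ j → j < i → j ∈ xs
    · exact ⟨i, hmn, le_refl _, hi, hc⟩
    · push Not at hc
      obtain ⟨j, hj1, hj2, hj3⟩ := hc
      obtain ⟨m, h1, h2, h3, h4⟩ := ih (j - mn).toNat (by omega) j rfl hj1 hj3
      exact ⟨m, h1, by omega, h3, h4⟩

-- A's range scan returns exactly the least missing index
theorem pv_scanA_range (xs : List Int) (m mx : Int) :
    ∀ (n : Nat) (a : Int), (m - a).toNat = n → a ≤ m → m < mx →
      (∀ j, a ≤ j → j < m → j ∈ xs) → m ∉ xs →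
      pvScanA xs (mx - a).toNat a = [m] := by
  intro n
  induction n with
  | zero =>
    intro a h0 ham hmx hcov hm
    have ha : a = m := by omega
    obtain ⟨k, hk⟩ : ∃ k, (mx - a).toNat = k + 1 := ⟨(mx - a - 1).toNat, by omega⟩
    subst ha
    rw [hk, pvScanA]
    simp [hm]
  | succ n ih =>
    intro a h0 ham hmx hcov hm
    have ha : a < m := by omega
    have hax : a ∈ xs := hcov a (le_refl a) ha
    obtain ⟨k, hk⟩ : ∃ k, (mx - a).toNat = k + 1 := ⟨(mx - a - 1).toNat, by omega⟩
    rw [hk, pvScanA]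
    simp only [hax, not_true_eq_false, if_false]
    have := ih (a + 1) (by omega) (by omega) hmx (fun j h1 h2 => hcov j (by omega) h2) hm
    rwa [(by omega : (mx - (a + 1)).toNat = k)] at this

-- B's gap walk over a sorted list returns exactly the least missing index
theorem pv_gapScan (m : Int) :
    ∀ (l : List Int), l.Pairwise (· ≤ ·) →
      (∀ lo ∈ l.head?, lo < m ∧ ∀ j, lo ≤ j → j < m → j ∈ l) →
      m ∉ l → (∃ b ∈ l, m < b) → pvGapScan l = [m] := by
  intro l
  induction l with
  | nil => intro _ _ _ hb; simp at hb
  | cons x tl ih =>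
    intro hpw hhead hm hb
    obtain ⟨hxm, hcov⟩ := hhead x rfl
    match tl, hpw, hm, hb, ih with
    | [], _, _, hb, _ =>
      obtain ⟨b, hbmem, hbm⟩ := hb
      simp at hbmem
      omega
    | y :: rest, hpw, hm, hb, ih =>
      have hxy : x ≤ y := (List.pairwise_cons.mp hpw).1 y (by simp)
      have hpw' : (y :: rest).Pairwise (· ≤ ·) := (List.pairwise_cons.mp hpw).2
      have hrest : ∀ z ∈ rest, y ≤ z := (List.pairwise_cons.mp hpw').1
      by_cases hgap : y - x > 1
      · -- first gap met: the missing index is x + 1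
        have hm1 : m = x + 1 := by
          by_contra hne
          have hx1 := hcov (x + 1) (by omega) (by omega)
          rcases List.mem_cons.mp hx1 with h1 | h1
          · omega
          rcases List.mem_cons.mp h1 with h1 | h1
          · omega
          · have := hrest _ h1; omega
        simp [pvGapScan, hgap, hm1]
      · -- adjacent pair: recurse on the tail
        have hmy : m ∉ y :: rest := fun h => hm (List.mem_cons_of_mem x h)
        have hym : y < m := by
          have : y ≠ m := fun h => hmy (h ▸ List.mem_cons_self)
          omega
        have := ih hpw' (fun lo hlo => by
            rw [List.head?_cons, Option.mem_some_iff] at hlo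
            subst hlo
            refine ⟨hym, fun j h1 h2 => ?_⟩
            have hj := hcov j (by omega) h2
            rcases List.mem_cons.mp hj with h3 | h3
            · have : j = y := by omega
              exact this ▸ List.mem_cons_self
            · exact h3)
          hmy
          (by
            obtain ⟨b, hbmem, hbm⟩ := hb
            refine ⟨b, ?_, hbm⟩
            rcases List.mem_cons.mp hbmem with h3 | h3
            · omega
            · exact h3)
        simpa [pvGapScan, hgap] using this

-- fewer distinct values than the span holds ⟺ some index strictly between min and max is missing
theorem pv_gap_of_count (x y : Int) (t : List Int)
    (hlen : ((PySem.List.dedup (x :: y :: t)).length : Int)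
      < (y :: t).foldl max x - (y :: t).foldl min x + 1) :
    ∃ i, (y :: t).foldl min x ≤ i ∧ i < (y :: t).foldl max x ∧ i ∉ (x :: y :: t) := by
  by_contra hc
  push Not at hc
  have hsub : PySem.List.pyRange ((y :: t).foldl min x) ((y :: t).foldl max x + 1) 1
      ⊆ PySem.List.dedup (x :: y :: t) := by
    intro i hi
    rw [PySem.List.mem_pyRange_one] at hi
    rw [PySem.List.mem_dedup]
    by_cases hieq : i = (y :: t).foldl max x
    · subst hieq
      rcases PySem.List.foldl_max_mem (y :: t) x with h' | h'
      · rw [h']; exact List.mem_cons_self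
      · exact List.mem_cons_of_mem _ h'
    · exact hc i hi.1 (by omega)
  have hle := (List.Nodup.subperm (PySem.List.nodup_pyRange_one _ _) hsub).length_le
  rw [PySem.List.length_pyRange_one] at hle
  omega

-- ===== VERDICT (by name: the statement is the Claim_ definition above) =====
theorem find_completing_indices_in_line_py_spec : Claim_equal_find_completing_indices_in_line_py := by
  intro xs _ hpre
  unfold Spec_find_completing_indices_in_line_py
  match xs, hpre with
  | [x], _ => rfl
  | x :: y :: t, hpre =>
    have hpre' : (y :: t).foldl min x + 1 = (y :: t).foldl max x ∨
        ((PySem.List.dedup (x :: y :: t)).length : Int)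
          < (y :: t).foldl max x - (y :: t).foldl min x + 1 := hpre
    obtain ⟨lo, rest, hs⟩ : ∃ lo rest,
        PySem.List.sorted (x :: y :: t) (fun x => x) false = lo :: rest := by
      have hp := PySem.List.sorted_perm (x :: y :: t) (fun x => x) false
      cases hsort : PySem.List.sorted (x :: y :: t) (fun x => x) false with
      | nil => rw [hsort] at hp; simpa using hp.length_eq
      | cons a b => exact ⟨a, b, rfl⟩
    have hlo : lo = (y :: t).foldl min x := pv_head_sorted x (y :: t) lo rest hs
    obtain ⟨hi, hhi⟩ : ∃ hi,
        (PySem.List.sorted (x :: y :: t) (fun x => x) false).getLast? = some hi := by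
      rw [hs]
      cases hlast : (lo :: rest).getLast? with
      | none => rw [List.getLast?_eq_none_iff] at hlast; cases hlast
      | some z => exact ⟨z, rfl⟩
    have hhi_eq : hi = (y :: t).foldl max x := pv_last_sorted x (y :: t) hi hhi
    have hperm := PySem.List.sorted_perm (x :: y :: t) (fun x => x) false
    rw [hs] at hperm hhi
    have eqA : find_completing_indices_in_line_py (x :: y :: t)
        = (if (y :: t).foldl min x + 1 = (y :: t).foldl max x
           then [(y :: t).foldl min x - 1, (y :: t).foldl max x + 1]
           else pvScanA (x :: y :: t)
             ((y :: t).foldl max x - (y :: t).foldl min x).toNat ((y :: t).foldl min x)) := by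
      unfold find_completing_indices_in_line_py
      rw [if_neg (by simp)]
    have eqB : find_completing_indices_in_line_py_alt (x :: y :: t)
        = (if lo + 1 = hi then [lo - 1, hi + 1] else pvGapScan (lo :: rest)) := by
      unfold find_completing_indices_in_line_py_alt
      rw [if_neg (by simp)]
      simp only [hs, PySem.List.pyGet?_zero_cons, PySem.List.pyGet?_neg_one, hhi]
    rw [eqA, eqB]
    by_cases hc : (y :: t).foldl min x + 1 = (y :: t).foldl max x
    · rw [if_pos hc, if_pos (by omega)]
      rw [hlo, hhi_eq]
    · rw [if_neg hc, if_neg (by omega)]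
      obtain ⟨i, hiR1, hiR2, hinot⟩ := pv_gap_of_count x y t (hpre'.resolve_left hc)
      obtain ⟨m, hm1, hm2, hm3, hm4⟩ :=
        pv_exists_least (x :: y :: t) ((y :: t).foldl min x) (i - (y :: t).foldl min x).toNat
          i rfl hiR1 hinot
      have hmn_mem : (y :: t).foldl min x ∈ x :: y :: t := by
        rcases PySem.List.foldl_min_mem (y :: t) x with h' | h'
        · rw [h']; exact List.mem_cons_self
        · exact List.mem_cons_of_mem _ h'
      have hmx_mem : (y :: t).foldl max x ∈ x :: y :: t := by
        rcases PySem.List.foldl_max_mem (y :: t) x with h' | h'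
        · rw [h']; exact List.mem_cons_self
        · exact List.mem_cons_of_mem _ h'
      have hmnm : (y :: t).foldl min x < m :=
        lt_of_le_of_ne hm1 (fun h => hm3 (h ▸ hmn_mem))
      have hA : pvScanA (x :: y :: t)
          ((y :: t).foldl max x - (y :: t).foldl min x).toNat ((y :: t).foldl min x) = [m] :=
        pv_scanA_range (x :: y :: t) m ((y :: t).foldl max x)
          (m - (y :: t).foldl min x).toNat ((y :: t).foldl min x) rfl hm1 (by omega) hm4 hm3
      have hpw := PySem.List.sorted_pairwise (x :: y :: t) (fun x => x)
      rw [hs] at hpw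
      have hB : pvGapScan (lo :: rest) = [m] := by
        apply pv_gapScan m (lo :: rest) hpw
        · intro lo' hlo'
          rw [List.head?_cons, Option.mem_some_iff] at hlo'
          subst hlo'
          exact ⟨by omega, fun j h1 h2 =>
            hperm.mem_iff.mpr (hm4 j (by omega) h2)⟩
        · exact fun h => hm3 (hperm.mem_iff.mp h)
        · exact ⟨(y :: t).foldl max x, hperm.mem_iff.mpr hmx_mem, by omega⟩
      rw [hA, hB]
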